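-- pv_equiv track=rewrite | github.com/thewizardplusplus/micro | micro/function_type.py | _simplify_type
-- ===== SOURCE A (Python) =====
-- def _simplify_type(arities):
--     # remove trailing zero arities
--     return arities[:next((
--         index
--         for index, arity in zip(
--             range(len(arities), 0, -1),
--             reversed(arities),
--         )
--         if arity != 0
--     ), 0)]
-- ===== SOURCE B (Python) =====
-- def _simplify_type(arities):
--     # remove trailing zero arities: one forward pass recording the cut point
--     last = 0
--     for index, arity in enumerate(arities):
--         if arity != 0:
--             last = index + 1
--     return arities[:last]
-- ===== Notes on version B (the rewrite author's own statement) =====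
-- stated objective: idiomatic
-- what changed: Replaced the reverse-scan generator (zip of a countdown range with reversed(arities), first non-zero wins) by a single forward enumerate pass that keeps updating the cut point `last` after each non-zero arity.
import Mathlib
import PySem

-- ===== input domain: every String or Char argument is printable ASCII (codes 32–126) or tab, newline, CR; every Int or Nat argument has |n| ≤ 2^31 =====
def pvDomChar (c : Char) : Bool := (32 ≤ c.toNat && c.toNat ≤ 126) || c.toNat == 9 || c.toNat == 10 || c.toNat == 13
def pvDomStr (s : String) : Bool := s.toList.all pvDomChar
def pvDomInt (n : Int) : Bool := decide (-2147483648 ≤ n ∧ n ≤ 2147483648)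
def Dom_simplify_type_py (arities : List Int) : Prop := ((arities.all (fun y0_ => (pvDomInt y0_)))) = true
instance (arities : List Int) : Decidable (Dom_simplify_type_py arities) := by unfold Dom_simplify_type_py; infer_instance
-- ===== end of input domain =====

-- B replaces A's reverse-scan generator by a forward enumerate pass recording the cut point (idiomatic).

-- ===== PORT A =====
-- next((index for index, arity in pairs if arity != 0), 0)
def pvFirstNonzeroIdx : List (Int × Int) → Int
  | [] => 0
  | (idx, a) :: rest => if a ≠ 0 then idx else pvFirstNonzeroIdx rest

def simplify_type_py (arities : List Int) : List Int :=
  PySem.List.slice arities none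
    (some (pvFirstNonzeroIdx
      ((PySem.List.pyRange (arities.length : Int) 0 (-1)).zip arities.reverse)))

-- ===== PORT B =====
def simplify_type_py_alt (arities : List Int) : List Int :=
  let last : Int :=
    (PySem.List.enumerate arities 0).foldl
      (fun last p => if p.2 ≠ 0 then p.1 + 1 else last) 0
  PySem.List.slice arities none (some last)

-- ===== PRECONDITION & SPEC =====
def Spec_simplify_type_py (arities : List Int) (out : List Int) : Prop := out = simplify_type_py_alt arities
instance (arities : List Int) (out : List Int) : Decidable (Spec_simplify_type_py arities out) := by unfold Spec_simplify_type_py; infer_instance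

-- ===== CLAIM (what is proved, stated in full; the proofs are below) =====
def Claim_equal_simplify_type_py : Prop := ∀ (arities : List Int), Dom_simplify_type_py arities → Spec_simplify_type_py arities (simplify_type_py arities)

-- ===== LEMMAS AND PROOFS =====

theorem pv_enumerate_append (ys zs : List Int) (s : Int) :
    PySem.List.enumerate (ys ++ zs) s
      = PySem.List.enumerate ys s ++ PySem.List.enumerate zs (s + ys.length) := by
  induction ys generalizing s with
  | nil => simp [PySem.List.enumerate_nil]
  | cons y ys ih =>
      simp [PySem.List.enumerate_cons, ih]
      ring_nf

theorem pv_cuts_eq (xs : List Int) :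
    pvFirstNonzeroIdx
        ((PySem.List.pyRange (xs.length : Int) 0 (-1)).zip xs.reverse)
      = (PySem.List.enumerate xs 0).foldl
          (fun last p => if p.2 ≠ 0 then p.1 + 1 else last) 0 := by
  induction xs using List.reverseRecOn with
  | nil => simp [PySem.List.pyRange, pvFirstNonzeroIdx, PySem.List.enumerate_nil]
  | append_singleton ys a ih =>
      have hlen : ((ys ++ [a]).length : Int) = (ys.length : Int) + 1 := by simp
      have hcons : PySem.List.pyRange ((ys ++ [a]).length : Int) 0 (-1)
          = ((ys.length : Int) + 1) :: PySem.List.pyRange (ys.length : Int) 0 (-1) := by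
        rw [hlen, PySem.List.pyRange_neg_one_cons (by positivity)]
        norm_num
      rw [pv_enumerate_append, List.foldl_append]
      simp only [List.reverse_append, List.reverse_singleton, List.singleton_append,
        hcons, List.zip_cons_cons, pvFirstNonzeroIdx,
        PySem.List.enumerate_cons, PySem.List.enumerate_nil, List.foldl_cons, List.foldl_nil]
      by_cases ha : a = 0 <;> simp [ha, ih]

-- ===== VERDICT (by name: the statement is the Claim_ definition above) =====
theorem simplify_type_py_spec : Claim_equal_simplify_type_py := by
  intro arities _
  unfold Spec_simplify_type_py simplify_type_py simplify_type_py_alt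
  rw [pv_cuts_eq]
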